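-- pv_equiv track=rewrite | github.com/khiwniti/ai-simulation-platform | apps/backend/app/services/agents/orchestrator.py | _find_conflicting_suggestions
-- ===== SOURCE A (Python) =====
-- from typing import Dict, List, Optional, Set, Any, Tuple
--
-- def _find_conflicting_suggestions(suggestions1: List[str], suggestions2: List[str]) -> List[Dict[str, str]]:
--     """Find conflicting suggestion pairs."""
--     conflicts = []
--
--     # Define conflicting keywords/patterns
--     conflict_patterns = [
--         (['increase', 'higher', 'more', 'boost'], ['decrease', 'lower', 'less', 'reduce']),
--         (['enable', 'turn on', 'activate'], ['disable', 'turn off', 'deactivate']),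
--         (['use', 'apply', 'implement'], ['avoid', 'remove', 'skip']),
--         (['fast', 'quick', 'speed'], ['slow', 'careful', 'gradual']),
--         (['simple', 'basic'], ['complex', 'advanced', 'sophisticated'])
--     ]
--
--     for s1 in suggestions1:
--         for s2 in suggestions2:
--             s1_lower = s1.lower()
--             s2_lower = s2.lower()
--
--             # Check for direct contradictions
--             for positive_terms, negative_terms in conflict_patterns:
--                 if (any(term in s1_lower for term in positive_terms) and
--                     any(term in s2_lower for term in negative_terms)):
--                     conflicts.append({
--                         'suggestion1': s1,
--                         'suggestion2': s2,
--                         'conflict_type': 'contradiction'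
--                     })
--                     break
--                 elif (any(term in s1_lower for term in negative_terms) and
--                       any(term in s2_lower for term in positive_terms)):
--                     conflicts.append({
--                         'suggestion1': s1,
--                         'suggestion2': s2,
--                         'conflict_type': 'contradiction'
--                     })
--                     break
--
--     return conflicts
-- ===== SOURCE B (Python) =====
-- from typing import Dict, List
--
-- _CONFLICT_PATTERNS = [
--     (['increase', 'higher', 'more', 'boost'], ['decrease', 'lower', 'less', 'reduce']),
--     (['enable', 'turn on', 'activate'], ['disable', 'turn off', 'deactivate']),
--     (['use', 'apply', 'implement'], ['avoid', 'remove', 'skip']),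
--     (['fast', 'quick', 'speed'], ['slow', 'careful', 'gradual']),
--     (['simple', 'basic'], ['complex', 'advanced', 'sophisticated']),
-- ]
--
--
-- def _index(s: str):
--     """Return (s, set of pattern indices whose positive terms s contains,
--     set of pattern indices whose negative terms s contains)."""
--     sl = s.lower()
--     pos = {i for i, (p, _) in enumerate(_CONFLICT_PATTERNS) if any(t in sl for t in p)}
--     neg = {i for i, (_, n) in enumerate(_CONFLICT_PATTERNS) if any(t in sl for t in n)}
--     return s, pos, neg
--
--
-- def _find_conflicting_suggestions(suggestions1: List[str], suggestions2: List[str]) -> List[Dict[str, str]]: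
--     idx1 = [_index(s) for s in suggestions1]
--     idx2 = [_index(s) for s in suggestions2]
--     return [
--         {'suggestion1': s1, 'suggestion2': s2, 'conflict_type': 'contradiction'}
--         for s1, p1, n1 in idx1
--         for s2, p2, n2 in idx2
--         if (p1 & n2) or (n1 & p2)
--     ]
-- ===== Notes on version B (the rewrite author's own statement) =====
-- stated objective: faster
-- what changed: Replaces the per-pair scan over the pattern/term lists (with its early break) by a precomputed per-suggestion pair of pattern-index sets, so each pair is decided by two set-intersection tests in a comprehension.
import Mathlib
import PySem

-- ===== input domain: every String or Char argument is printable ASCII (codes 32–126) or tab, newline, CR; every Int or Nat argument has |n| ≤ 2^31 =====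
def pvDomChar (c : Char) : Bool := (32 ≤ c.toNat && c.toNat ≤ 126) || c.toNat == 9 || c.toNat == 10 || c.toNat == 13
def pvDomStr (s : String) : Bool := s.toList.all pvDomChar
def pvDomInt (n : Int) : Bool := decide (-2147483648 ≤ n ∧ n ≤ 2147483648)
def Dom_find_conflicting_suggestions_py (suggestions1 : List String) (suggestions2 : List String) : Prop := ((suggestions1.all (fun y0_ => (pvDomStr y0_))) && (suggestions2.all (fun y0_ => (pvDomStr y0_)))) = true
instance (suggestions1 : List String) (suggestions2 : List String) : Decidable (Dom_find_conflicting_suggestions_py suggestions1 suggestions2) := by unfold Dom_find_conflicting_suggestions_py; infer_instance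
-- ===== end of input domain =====

-- B replaces A's per-pair scan over the pattern list (with early break) by precomputed
-- per-suggestion pattern-index sets and an intersection test per pair (objective: alternative).

-- ===== PORT A =====
def pvPatterns : List (List String × List String) :=
  [ (["increase", "higher", "more", "boost"], ["decrease", "lower", "less", "reduce"]),
    (["enable", "turn on", "activate"], ["disable", "turn off", "deactivate"]),
    (["use", "apply", "implement"], ["avoid", "remove", "skip"]),
    (["fast", "quick", "speed"], ["slow", "careful", "gradual"]),
    (["simple", "basic"], ["complex", "advanced", "sophisticated"]) ]

def pvConflictDict (a b : String) : List (String × String) :=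
  [("suggestion1", a), ("suggestion2", b), ("conflict_type", "contradiction")]

-- the inner 'for positive_terms, negative_terms in conflict_patterns: … break' loop
def pvScanA (s1l s2l : String) (s1 s2 : String) : List (List String × List String) → List (List (String × String))
  | [] => []
  | (pos, neg) :: rest =>
    if (pos.any (fun t => PySem.Str.isIn t s1l)) && (neg.any (fun t => PySem.Str.isIn t s2l)) then
      [pvConflictDict s1 s2]
    else if (neg.any (fun t => PySem.Str.isIn t s1l)) && (pos.any (fun t => PySem.Str.isIn t s2l)) then
      [pvConflictDict s1 s2]
    else pvScanA s1l s2l s1 s2 rest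

def find_conflicting_suggestions_py (suggestions1 : List String) (suggestions2 : List String) : List (List (String × String)) :=
  suggestions1.foldl (fun conflicts s1 =>
    suggestions2.foldl (fun conflicts s2 =>
      conflicts ++ pvScanA (PySem.Str.lower s1) (PySem.Str.lower s2) s1 s2 pvPatterns) conflicts) []

-- ===== PORT B =====
-- Source B's _index: (s, indices of patterns whose positive terms s contains, same for negative)
def pvIndexB (s : String) : String × PySem.Set Int × PySem.Set Int :=
  let sl := PySem.Str.lower s
  ( s,
    PySem.Set.ofList (((PySem.List.enumerate pvPatterns).filter
      (fun p => p.2.1.any (fun t => PySem.Str.isIn t sl))).map (·.1)),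
    PySem.Set.ofList (((PySem.List.enumerate pvPatterns).filter
      (fun p => p.2.2.any (fun t => PySem.Str.isIn t sl))).map (·.1)) )

def find_conflicting_suggestions_py_alt (suggestions1 : List String) (suggestions2 : List String) : List (List (String × String)) :=
  let idx1 := suggestions1.map pvIndexB
  let idx2 := suggestions2.map pvIndexB
  idx1.flatMap (fun x =>
    (idx2.filter (fun y =>
      !(PySem.Set.inter x.2.1 y.2.2).isEmpty || !(PySem.Set.inter x.2.2 y.2.1).isEmpty)).map
      (fun y => pvConflictDict x.1 y.1))

-- ===== PRECONDITION & SPEC =====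
def Spec_find_conflicting_suggestions_py (suggestions1 : List String) (suggestions2 : List String) (out : List (List (String × String))) : Prop := out = find_conflicting_suggestions_py_alt suggestions1 suggestions2
instance (suggestions1 : List String) (suggestions2 : List String) (out : List (List (String × String))) : Decidable (Spec_find_conflicting_suggestions_py suggestions1 suggestions2 out) := by unfold Spec_find_conflicting_suggestions_py; infer_instance

-- ===== CLAIM (what is proved, stated in full; the proofs are below) =====
def Claim_equal_find_conflicting_suggestions_py : Prop := ∀ (suggestions1 : List String) (suggestions2 : List String), Dom_find_conflicting_suggestions_py suggestions1 suggestions2 → Spec_find_conflicting_suggestions_py suggestions1 suggestions2 (find_conflicting_suggestions_py suggestions1 suggestions2)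

-- ===== LEMMAS AND PROOFS =====

@[simp] theorem pvIndexB_fst (s : String) : (pvIndexB s).1 = s := rfl

-- the pair-level conflict predicate both programs decide
def pvHit (s1l s2l : String) (pn : List String × List String) : Bool :=
  ((pn.1.any (fun t => PySem.Str.isIn t s1l)) && (pn.2.any (fun t => PySem.Str.isIn t s2l))) ||
  ((pn.2.any (fun t => PySem.Str.isIn t s1l)) && (pn.1.any (fun t => PySem.Str.isIn t s2l)))

-- A's inner pattern scan appends the dict iff some pattern hits
theorem pvScanA_eq (s1l s2l s1 s2 : String) (pats : List (List String × List String)) :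
    pvScanA s1l s2l s1 s2 pats =
      (if pats.any (pvHit s1l s2l) then [pvConflictDict s1 s2] else []) := by
  induction pats with
  | nil => rfl
  | cons pn rest ih =>
    simp only [pvScanA, List.any_cons, pvHit, ih]
    by_cases h1 : ((pn.1.any (fun t => PySem.Str.isIn t s1l)) && (pn.2.any (fun t => PySem.Str.isIn t s2l))) = true
    · simp only [h1, Bool.true_or]
      simp
    · rw [Bool.not_eq_true] at h1
      simp only [h1, Bool.false_or, Bool.false_eq_true, if_false]
      by_cases h2 : ((pn.2.any (fun t => PySem.Str.isIn t s1l)) && (pn.1.any (fun t => PySem.Str.isIn t s2l))) = true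
      · simp only [h2, Bool.true_or]
        simp
      · rw [Bool.not_eq_true] at h2
        simp only [h2, Bool.false_or, Bool.false_eq_true, if_false]

-- nonemptiness of the intersection of two filtered index sets = a joint 'any' over the list
theorem pvInterAny {A : Type} (l : List A) (f g : A → Bool) :
    (!(PySem.Set.inter
        (PySem.Set.ofList (((PySem.List.enumerate l).filter (fun p => f p.2)).map (fun x => x.1)))
        (PySem.Set.ofList (((PySem.List.enumerate l).filter (fun p => g p.2)).map (fun x => x.1)))).isEmpty)
      = l.any (fun x => f x && g x) := by
  rw [Bool.eq_iff_iff]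
  simp only [Bool.not_eq_eq_eq_not, Bool.not_true, List.isEmpty_eq_false_iff, ne_eq,
    List.any_eq_true, Bool.and_eq_true]
  constructor
  · intro h
    obtain ⟨i, hi⟩ := List.exists_mem_of_ne_nil _ h
    rw [PySem.Set.mem_inter, PySem.Set.mem_ofList, PySem.Set.mem_ofList] at hi
    simp only [List.mem_map, List.mem_filter, PySem.List.mem_enumerate_iff] at hi
    obtain ⟨⟨p, ⟨⟨k, hk, rfl⟩, hf⟩, rfl⟩, ⟨q, ⟨⟨k2, hk2, hq⟩, hg⟩, hq1⟩⟩ := hi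
    have hkk : k2 = k := by
      subst hq; simp at hq1; omega
    subst hkk; subst hq
    exact ⟨l[k2], List.getElem_mem hk2, hf, hg⟩
  · rintro ⟨x, hmem, hf, hg⟩
    obtain ⟨k, hk, rfl⟩ := List.mem_iff_getElem.mp hmem
    apply List.ne_nil_of_mem (a := (0 : Int) + k)
    rw [PySem.Set.mem_inter, PySem.Set.mem_ofList, PySem.Set.mem_ofList]
    simp only [List.mem_map, List.mem_filter, PySem.List.mem_enumerate_iff]
    exact ⟨⟨((0 : Int) + k, l[k]), ⟨⟨k, hk, rfl⟩, hf⟩, rfl⟩,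
      ⟨((0 : Int) + k, l[k]), ⟨⟨k, hk, rfl⟩, hg⟩, rfl⟩⟩

-- B's intersection test decides the same predicate
theorem pvIndexB_hit (s1 s2 : String) :
    (!(PySem.Set.inter (pvIndexB s1).2.1 (pvIndexB s2).2.2).isEmpty ||
     !(PySem.Set.inter (pvIndexB s1).2.2 (pvIndexB s2).2.1).isEmpty) =
      pvPatterns.any (pvHit (PySem.Str.lower s1) (PySem.Str.lower s2)) := by
  simp only [pvIndexB]
  rw [pvInterAny pvPatterns
        (fun pn => pn.1.any (fun t => PySem.Str.isIn t (PySem.Str.lower s1)))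
        (fun pn => pn.2.any (fun t => PySem.Str.isIn t (PySem.Str.lower s2))),
      pvInterAny pvPatterns
        (fun pn => pn.2.any (fun t => PySem.Str.isIn t (PySem.Str.lower s1)))
        (fun pn => pn.1.any (fun t => PySem.Str.isIn t (PySem.Str.lower s2)))]
  rw [Bool.eq_iff_iff]
  simp only [Bool.or_eq_true, List.any_eq_true, pvHit, Bool.and_eq_true]
  constructor
  · rintro (⟨x, hx, h⟩ | ⟨x, hx, h⟩)
    · exact ⟨x, hx, Or.inl h⟩
    · exact ⟨x, hx, Or.inr h⟩
  · rintro ⟨x, hx, h | h⟩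
    · exact Or.inl ⟨x, hx, h⟩
    · exact Or.inr ⟨x, hx, h⟩

-- per-pair agreement
theorem pvPair_eq (s1 s2 : String) :
    pvScanA (PySem.Str.lower s1) (PySem.Str.lower s2) s1 s2 pvPatterns =
      (if (!(PySem.Set.inter (pvIndexB s1).2.1 (pvIndexB s2).2.2).isEmpty ||
           !(PySem.Set.inter (pvIndexB s1).2.2 (pvIndexB s2).2.1).isEmpty) then
        [pvConflictDict s1 s2] else []) := by
  rw [pvScanA_eq, pvIndexB_hit]

-- inner loop over suggestions2 agrees
theorem pvInner_eq (s1 : String) (l2 : List String) (acc : List (List (String × String))) :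
    l2.foldl (fun conflicts s2 =>
        conflicts ++ pvScanA (PySem.Str.lower s1) (PySem.Str.lower s2) s1 s2 pvPatterns) acc =
      acc ++ ((l2.map pvIndexB).filter (fun y =>
          !(PySem.Set.inter (pvIndexB s1).2.1 y.2.2).isEmpty ||
          !(PySem.Set.inter (pvIndexB s1).2.2 y.2.1).isEmpty)).map
        (fun y => pvConflictDict s1 y.1) := by
  induction l2 generalizing acc with
  | nil => simp
  | cons s2 rest ih =>
    rw [List.foldl_cons, ih, pvPair_eq, List.map_cons, List.filter_cons]
    cases _h : (!(PySem.Set.inter (pvIndexB s1).2.1 (pvIndexB s2).2.2).isEmpty ||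
        !(PySem.Set.inter (pvIndexB s1).2.2 (pvIndexB s2).2.1).isEmpty) <;> simp

theorem pvOuter_eq (l1 l2 : List String) (acc : List (List (String × String))) :
    l1.foldl (fun conflicts s1 =>
        l2.foldl (fun conflicts s2 =>
          conflicts ++ pvScanA (PySem.Str.lower s1) (PySem.Str.lower s2) s1 s2 pvPatterns) conflicts) acc =
      acc ++ (l1.map pvIndexB).flatMap (fun x =>
        ((l2.map pvIndexB).filter (fun y =>
          !(PySem.Set.inter x.2.1 y.2.2).isEmpty || !(PySem.Set.inter x.2.2 y.2.1).isEmpty)).map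
          (fun y => pvConflictDict x.1 y.1)) := by
  induction l1 generalizing acc with
  | nil => simp
  | cons s1 rest ih =>
    rw [List.foldl_cons, pvInner_eq, ih, List.map_cons, List.flatMap_cons]
    simp

-- ===== VERDICT (by name: the statement is the Claim_ definition above) =====
theorem find_conflicting_suggestions_py_spec : Claim_equal_find_conflicting_suggestions_py := by
  intro l1 l2 _
  show _ = _
  simp only [find_conflicting_suggestions_py, find_conflicting_suggestions_py_alt]
  rw [pvOuter_eq]
  rfl
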